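-- pv_equiv track=rewrite | github.com/masmi9/BluJay | scanners/aods/core/shared_infrastructure/learning_system.py | _is_unusual_combination
-- ===== SOURCE A (Python) =====
-- from typing import Dict, List, Any, Optional, Tuple
--
-- def _is_unusual_combination(pattern_types: List[str]) -> bool:
--     """Check if pattern type combination is unusual."""
--     # Simple heuristic - this could be enhanced with actual data
--     incompatible_combinations = [
--         ("crypto_strong", "crypto_weak"),
--         ("secure_storage", "insecure_storage"),
--         ("encrypted", "plaintext"),
--     ]
--
--     pattern_set = set(pattern_types)
--     for combo in incompatible_combinations:
--         if all(pattern in pattern_set for pattern in combo):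
--             return True
--
--     return False
-- ===== SOURCE B (Python) =====
-- # B: single pass with a bidirectional partner table and a running 'seen' set,
-- # instead of A's "build full set, then scan the fixed pair list".
--
-- _PARTNER = {
--     "crypto_strong": "crypto_weak",
--     "crypto_weak": "crypto_strong",
--     "secure_storage": "insecure_storage",
--     "insecure_storage": "secure_storage",
--     "encrypted": "plaintext",
--     "plaintext": "encrypted",
-- }
--
--
-- def _is_unusual_combination(pattern_types):
--     seen = set()
--     for p in pattern_types:
--         partner = _PARTNER.get(p)
--         if partner is not None and partner in seen:
--             return True
--         seen.add(p)
--     return False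
-- ===== Notes on version B (the rewrite author's own statement) =====
-- stated objective: alternative
-- what changed: Replaces A's build-a-set-then-scan-the-fixed-pair-list shape with a bidirectional partner table and one early-exiting pass over pattern_types maintaining a seen set.
import Mathlib
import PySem

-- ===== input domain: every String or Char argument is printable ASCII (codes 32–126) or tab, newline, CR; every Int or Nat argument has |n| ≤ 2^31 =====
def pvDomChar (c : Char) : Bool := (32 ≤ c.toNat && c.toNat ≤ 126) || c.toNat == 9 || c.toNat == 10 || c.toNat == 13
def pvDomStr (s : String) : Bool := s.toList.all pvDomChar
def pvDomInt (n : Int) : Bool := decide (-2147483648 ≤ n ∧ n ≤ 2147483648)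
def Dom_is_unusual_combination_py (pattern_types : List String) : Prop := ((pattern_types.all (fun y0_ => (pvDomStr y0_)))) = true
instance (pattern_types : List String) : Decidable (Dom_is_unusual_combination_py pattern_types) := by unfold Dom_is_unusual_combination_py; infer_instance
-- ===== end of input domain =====

-- B replaces A's "build full set, scan the fixed pair list" with a bidirectional
-- partner table and a single early-exiting pass maintaining a 'seen' set (alternative decomposition, same cost).


-- ===== PORT A =====
-- the literal 'incompatible_combinations' list from A
def pvIncompatible : List (String × String) :=
  [("crypto_strong", "crypto_weak"),
   ("secure_storage", "insecure_storage"),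
   ("encrypted", "plaintext")]

def is_unusual_combination_py (pattern_types : List String) : Bool :=
  let pattern_set : PySem.Set String := PySem.Set.ofList pattern_types
  -- 'for combo in …: if all(… in pattern_set for pattern in combo): return True / return False'
  pvIncompatible.any (fun combo =>
    PySem.Set.contains pattern_set combo.1 && PySem.Set.contains pattern_set combo.2)

-- ===== PORT B =====
-- B's module-level _PARTNER dict (literal, keys distinct)
def pvPartnerDict : PySem.Dict String String := PySem.Dict.mk
  [("crypto_strong", "crypto_weak"), ("crypto_weak", "crypto_strong"),
   ("secure_storage", "insecure_storage"), ("insecure_storage", "secure_storage"),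
   ("encrypted", "plaintext"), ("plaintext", "encrypted")]

-- B's early-exiting loop over pattern_types with its 'seen' set
def pvAltLoop : List String → PySem.Set String → Bool
  | [], _ => false
  | p :: rest, seen =>
    match pvPartnerDict.get? p with
    | some q => if PySem.Set.contains seen q then true else pvAltLoop rest (PySem.Set.add seen p)
    | none => pvAltLoop rest (PySem.Set.add seen p)

def is_unusual_combination_py_alt (pattern_types : List String) : Bool :=
  pvAltLoop pattern_types PySem.Set.empty

-- ===== PRECONDITION & SPEC =====
def Spec_is_unusual_combination_py (pattern_types : List String) (out : Bool) : Prop := out = is_unusual_combination_py_alt pattern_types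
instance (pattern_types : List String) (out : Bool) : Decidable (Spec_is_unusual_combination_py pattern_types out) := by unfold Spec_is_unusual_combination_py; infer_instance

-- ===== CLAIM (what is proved, stated in full; the proofs are below) =====
def Claim_equal_is_unusual_combination_py : Prop := ∀ (pattern_types : List String), Dom_is_unusual_combination_py pattern_types → Spec_is_unusual_combination_py pattern_types (is_unusual_combination_py pattern_types)

-- ===== LEMMAS AND PROOFS =====

-- the partner dict is exactly the 6-pair relation (both directions of A's 3 combos)
theorem pv_partner_iff (a b : String) :
    pvPartnerDict.get? a = some b ↔
      (a, b) ∈ ([("crypto_strong", "crypto_weak"), ("crypto_weak", "crypto_strong"),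
        ("secure_storage", "insecure_storage"), ("insecure_storage", "secure_storage"),
        ("encrypted", "plaintext"), ("plaintext", "encrypted")] : List (String × String)) := by
  simp only [pvPartnerDict, PySem.Dict.get?_mk_cons, List.mem_cons, List.not_mem_nil, or_false,
    Prod.mk.injEq, beq_iff_eq]
  split_ifs <;> (try subst_vars) <;> simp_all [PySem.Dict.get?, eq_comm]

theorem pv_partner_symm (a b : String) (h : pvPartnerDict.get? a = some b) :
    pvPartnerDict.get? b = some a ∧ a ≠ b := by
  rw [pv_partner_iff] at h
  simp only [List.mem_cons, List.not_mem_nil, or_false, Prod.mk.injEq] at h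
  rcases h with ⟨ha, hb⟩ | ⟨ha, hb⟩ | ⟨ha, hb⟩ | ⟨ha, hb⟩ | ⟨ha, hb⟩ | ⟨ha, hb⟩ <;>
    subst ha <;> subst hb <;> exact ⟨by decide, by decide⟩

-- one step of B's loop
theorem pv_altLoop_cons (p : String) (rest : List String) (seen : PySem.Set String) :
    pvAltLoop (p :: rest) seen = true ↔
      (∃ q, pvPartnerDict.get? p = some q ∧ q ∈ seen) ∨
        pvAltLoop rest (PySem.Set.add seen p) = true := by
  rw [pvAltLoop]
  cases hg : pvPartnerDict.get? p <;> simp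

-- characterisation of B's loop
theorem pv_altLoop_iff (l : List String) (seen : PySem.Set String) :
    pvAltLoop l seen = true ↔
      ∃ a ∈ l, ∃ b, pvPartnerDict.get? a = some b ∧ (b ∈ seen ∨ b ∈ l) := by
  induction l generalizing seen with
  | nil => simp [pvAltLoop]
  | cons p rest ih =>
    rw [pv_altLoop_cons, ih]
    constructor
    · rintro (⟨q, hg, hq⟩ | ⟨a, ha, b, hab, hb⟩)
      · exact ⟨p, by simp, q, hg, Or.inl hq⟩
      · refine ⟨a, by simp [ha], b, hab, ?_⟩
        rcases hb with hb | hb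
        · rcases (PySem.Set.mem_add seen p b).mp hb with hb | hb
          · exact Or.inl hb
          · exact Or.inr (by simp [hb])
        · exact Or.inr (by simp [hb])
    · rintro ⟨a, ha, b, hab, hb⟩
      rcases List.mem_cons.mp ha with rfl | ha
      · -- the head element a has partner b
        rcases hb with hb | hb
        · exact Or.inl ⟨b, hab, hb⟩
        · rcases List.mem_cons.mp hb with rfl | hb
          · exact absurd rfl (pv_partner_symm _ _ hab).2
          · -- b is in rest; the loop fires from b's side: partner b = a, a ∈ seen.add a
            exact Or.inr ⟨b, hb, a, (pv_partner_symm _ _ hab).1,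
              Or.inl ((PySem.Set.mem_add seen a a).mpr (Or.inr rfl))⟩
      · -- a is in rest
        refine Or.inr ⟨a, ha, b, hab, ?_⟩
        rcases hb with hb | hb
        · exact Or.inl ((PySem.Set.mem_add seen p b).mpr (Or.inl hb))
        · rcases List.mem_cons.mp hb with rfl | hb
          · exact Or.inl ((PySem.Set.mem_add seen b b).mpr (Or.inr rfl))
          · exact Or.inr hb

-- ===== VERDICT (by name: the statement is the Claim_ definition above) =====
theorem is_unusual_combination_py_spec : Claim_equal_is_unusual_combination_py := by
  intro l _
  unfold Spec_is_unusual_combination_py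
  rw [Bool.eq_iff_iff]
  unfold is_unusual_combination_py is_unusual_combination_py_alt
  rw [pv_altLoop_iff]
  simp only [List.any_eq_true, Bool.and_eq_true, PySem.Set.contains_iff,
    PySem.Set.mem_ofList, pvIncompatible, List.mem_cons, List.not_mem_nil, or_false]
  constructor
  · rintro ⟨c, hc, h1, h2⟩
    rcases hc with rfl | rfl | rfl
    · exact ⟨"crypto_strong", h1, "crypto_weak", by rw [pv_partner_iff]; simp, Or.inr h2⟩
    · exact ⟨"secure_storage", h1, "insecure_storage", by rw [pv_partner_iff]; simp, Or.inr h2⟩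
    · exact ⟨"encrypted", h1, "plaintext", by rw [pv_partner_iff]; simp, Or.inr h2⟩
  · rintro ⟨a, ha, b, hab, hb⟩
    rcases hb with hb | hb
    · exact absurd hb (by simp [PySem.Set.empty])
    · rw [pv_partner_iff] at hab
      simp only [List.mem_cons, List.not_mem_nil, or_false, Prod.mk.injEq] at hab
      rcases hab with ⟨rfl, rfl⟩ | ⟨rfl, rfl⟩ | ⟨rfl, rfl⟩ | ⟨rfl, rfl⟩ | ⟨rfl, rfl⟩ | ⟨rfl, rfl⟩
      · exact ⟨_, Or.inl rfl, ha, hb⟩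
      · exact ⟨_, Or.inl rfl, hb, ha⟩
      · exact ⟨_, Or.inr (Or.inl rfl), ha, hb⟩
      · exact ⟨_, Or.inr (Or.inl rfl), hb, ha⟩
      · exact ⟨_, Or.inr (Or.inr rfl), ha, hb⟩
      · exact ⟨_, Or.inr (Or.inr rfl), hb, ha⟩
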